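-- pv_equiv track=rewrite | github.com/Jess607/Data-Structures-And-Algorithms | Data_structures_and_algorithms/climb_ladder.py | climb_ladder
-- ===== SOURCE A (Python) =====
-- def climb_ladder(arr, arr_two):
--     set_arr=set(arr)
--     lis=[]
--     for i in arr_two:
--         new_arr=list(set_arr)
--         new_arr.append(i)
--         new_arr.sort(reverse=True)
--         lis.append(new_arr.index(i)+1)
--         set_arr.add(i)
--     return lis
-- ===== SOURCE B (Python) =====
-- def climb_ladder(arr, arr_two):
--     s = sorted(set(arr))
--     out = []
--     for q in arr_two:
--         lo, hi = 0, len(s)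
--         while lo < hi:
--             mid = (lo + hi) // 2
--             if s[mid] <= q: lo = mid + 1
--             else: hi = mid
--         out.append(len(s) - lo + 1)
--         if lo == 0 or s[lo-1] != q:
--             s.insert(lo, q)
--     return out
-- ===== Notes on version B (the rewrite author's own statement) =====
-- stated objective: faster
-- what changed: Instead of rebuilding, reverse-sorting and .index-scanning a list of the seen set for every query, B keeps one ascending sorted list of distinct values and binary-searches it, so the rank is len - bisect_right(q) + 1 and new values are inserted at the found position.
import Mathlib
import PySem

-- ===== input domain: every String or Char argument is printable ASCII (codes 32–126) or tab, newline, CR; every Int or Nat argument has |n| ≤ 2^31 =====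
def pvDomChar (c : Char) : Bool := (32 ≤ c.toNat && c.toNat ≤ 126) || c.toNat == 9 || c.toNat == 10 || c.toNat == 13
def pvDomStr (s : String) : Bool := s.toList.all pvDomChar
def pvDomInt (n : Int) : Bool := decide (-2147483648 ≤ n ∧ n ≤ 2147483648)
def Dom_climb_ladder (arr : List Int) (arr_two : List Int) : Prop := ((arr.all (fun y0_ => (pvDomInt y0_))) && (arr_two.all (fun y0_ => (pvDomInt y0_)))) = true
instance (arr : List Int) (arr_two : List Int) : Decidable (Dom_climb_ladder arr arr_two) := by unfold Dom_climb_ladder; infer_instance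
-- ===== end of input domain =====

-- B replaces A's per-query "rebuild + reverse-sort + .index" over the seen set by one maintained
-- ascending sorted list with a hand-written binary search (rank = len - bisect_right + 1).


-- ===== PORT A =====
-- list(set_arr) has unmodelled hash order, but it is immediately sorted with no key, so the
-- sorted list (hence the whole result) does not depend on that order; we sort the Set's list.
-- i was just appended to new_arr, so new_arr.index(i) never raises: index? is always some
-- (the .getD 0 default is unreachable).
-- loop body of A (one iteration of 'for i in arr_two')
def pvStepA (st : PySem.Set Int × List Int) (i : Int) : PySem.Set Int × List Int :=
  (PySem.Set.add st.1 i,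
   st.2 ++ [(((PySem.List.index? (PySem.List.sorted (st.1 ++ [i]) (fun x => x) true) i).getD 0 : Nat) : Int) + 1])

def climb_ladder (arr : List Int) (arr_two : List Int) : List Int :=
  (arr_two.foldl pvStepA (PySem.Set.ofList arr, [])).2

-- ===== PORT B =====
-- the 'while lo < hi' binary-search loop of Source B; s[mid] is in range whenever hi ≤ len(s),
-- which the loop maintains, so getD's default is unreachable.
-- structural fuel recursion (fuel = hi - lo bounds the iteration count, and shrinks by at
-- least one per round, so the 'fuel ran out' branch is never the one that decides the result)
def pvBisectFuel (s : List Int) (q : Int) : Nat → Nat → Nat → Nat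
  | lo, _, 0 => lo
  | lo, hi, n + 1 =>
    if lo < hi then
      if s.getD ((lo + hi) / 2) 0 ≤ q then pvBisectFuel s q ((lo + hi) / 2 + 1) hi n
      else pvBisectFuel s q lo ((lo + hi) / 2) n
    else lo

def pvBisect (s : List Int) (q : Int) (lo hi : Nat) : Nat := pvBisectFuel s q lo hi (hi - lo)

-- loop body of B; s[lo-1] in Source B is only reached when lo != 0 (short-circuit 'or'),
-- so it is in range there.
def pvStepB (st : List Int × List Int) (q : Int) : List Int × List Int :=
  let lo := pvBisect st.1 q 0 st.1.length
  let out := st.2 ++ [((st.1.length : Int) - (lo : Int)) + 1]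
  if lo = 0 ∨ st.1.getD (lo - 1) 0 ≠ q
  then (PySem.List.insert st.1 (lo : Int) q, out)
  else (st.1, out)

def climb_ladder_alt (arr : List Int) (arr_two : List Int) : List Int :=
  (arr_two.foldl pvStepB (PySem.List.sorted (PySem.Set.ofList arr) (fun x => x) false, [])).2

-- ===== PRECONDITION & SPEC =====
def Spec_climb_ladder (arr : List Int) (arr_two : List Int) (out : List Int) : Prop := out = climb_ladder_alt arr arr_two
instance (arr : List Int) (arr_two : List Int) (out : List Int) : Decidable (Spec_climb_ladder arr arr_two out) := by unfold Spec_climb_ladder; infer_instance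

-- ===== CLAIM (what is proved, stated in full; the proofs are below) =====
def Claim_equal_climb_ladder : Prop := ∀ (arr : List Int) (arr_two : List Int), Dom_climb_ladder arr arr_two → Spec_climb_ladder arr arr_two (climb_ladder arr arr_two)

-- ===== LEMMAS AND PROOFS =====

-- In a descending-sorted list, the first occurrence of a member v sits right after the
-- elements strictly greater than v.
theorem index_desc_eq_countP (l : List Int) (v : Int)
    (hs : l.Pairwise (fun a b => b ≤ a)) (hm : v ∈ l) :
    PySem.List.index? l v = some (l.countP (fun x => decide (v < x))) := by
  induction l with
  | nil => cases hm
  | cons a t ih =>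
    rcases List.pairwise_cons.mp hs with ⟨ha, ht⟩
    by_cases hav : a = v
    · subst hav
      have hz : t.countP (fun x => decide (a < x)) = 0 := by
        refine List.countP_eq_zero.mpr ?_
        intro x hx
        simpa using not_lt.mpr (ha x hx)
      rw [PySem.List.index?_cons_self]
      simp [hz]
    · have hvt : v ∈ t := by
        rcases List.mem_cons.mp hm with h | h
        · exact absurd h.symm hav
        · exact h
      have hlt : v < a := lt_of_le_of_ne (ha v hvt) (fun h => hav h.symm)
      rw [PySem.List.index?_cons_of_ne (h := hav), ih ht hvt]
      simp [hlt]

-- A's per-query value is (count of seen elements strictly greater than q) + 1.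
theorem valueA (sa : List Int) (q : Int) :
    (((PySem.List.index? (PySem.List.sorted (sa ++ [q]) (fun x => x) true) q).getD 0 : Nat) : Int) + 1
      = (sa.countP (fun x => decide (q < x)) : Int) + 1 := by
  have hperm : (PySem.List.sorted (sa ++ [q]) (fun x => x) true).Perm (sa ++ [q]) :=
    PySem.List.sorted_perm _ _ _
  have hidx :
      PySem.List.index? (PySem.List.sorted (sa ++ [q]) (fun x => x) true) q
        = some ((sa ++ [q]).countP (fun x => decide (q < x))) := by
    rw [index_desc_eq_countP _ _ (PySem.List.sorted_pairwise_rev _ _) ?_, hperm.countP_eq]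
    exact (PySem.List.mem_sorted _ _ _ _).mpr (by simp)
  rw [hidx]
  simp [List.countP_append]

-- binary search: with sorted s (given as index-monotonicity) the loop returns the boundary
-- position: s[i] ≤ q exactly for the indices below the result.
theorem pvBisectFuel_spec (s : List Int) (q : Int)
    (hmono : ∀ i j (_ : i < s.length) (hj : j < s.length), i ≤ j → s[i] ≤ s[j]) :
    ∀ n lo hi, hi - lo ≤ n → lo ≤ hi → hi ≤ s.length →
      (∀ i (h : i < s.length), i < lo → s[i] ≤ q) →
      (∀ i (h : i < s.length), hi ≤ i → ¬ s[i] ≤ q) →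
      pvBisectFuel s q lo hi n ≤ hi ∧
      (∀ i (h : i < s.length), (s[i] ≤ q ↔ i < pvBisectFuel s q lo hi n)) := by
  intro n
  induction n with
  | zero =>
    intro lo hi hfuel hlh hhl hlow hhigh
    simp only [pvBisectFuel]
    refine ⟨hlh, fun i h => ⟨fun hle => ?_, fun hlt => hlow i h hlt⟩⟩
    by_contra hni
    exact hhigh i h (by omega) hle
  | succ n ih =>
    intro lo hi hfuel hlh hhl hlow hhigh
    simp only [pvBisectFuel]
    by_cases hc : lo < hi
    · rw [if_pos hc]
      have hmidlt : (lo + hi) / 2 < hi := by omega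
      have hmidge : lo ≤ (lo + hi) / 2 := by omega
      have hmidlen : (lo + hi) / 2 < s.length := by omega
      rw [List.getD_eq_getElem s 0 hmidlen]
      by_cases hle : s[(lo + hi) / 2] ≤ q
      · rw [if_pos hle]
        have hlow' : ∀ i (h : i < s.length), i < (lo + hi) / 2 + 1 → s[i] ≤ q :=
          fun i h hi2 => le_trans (hmono i ((lo + hi) / 2) h hmidlen (by omega)) hle
        exact ih ((lo + hi) / 2 + 1) hi (by omega) (by omega) hhl hlow' hhigh
      · rw [if_neg hle]
        have hhigh' : ∀ i (h : i < s.length), (lo + hi) / 2 ≤ i → ¬ s[i] ≤ q :=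
          fun i h hi2 hcon => hle (le_trans (hmono ((lo + hi) / 2) i hmidlen h hi2) hcon)
        have hrec := ih lo ((lo + hi) / 2) (by omega) (by omega) (by omega) hlow hhigh'
        exact ⟨le_trans hrec.1 (by omega), hrec.2⟩
    · rw [if_neg hc]
      refine ⟨hlh, fun i h => ⟨fun hle => ?_, fun hlt => hlow i h hlt⟩⟩
      by_contra hni
      exact hhigh i h (by omega) hle

theorem pvBisect_spec (s : List Int) (q : Int)
    (hmono : ∀ i j (_ : i < s.length) (hj : j < s.length), i ≤ j → s[i] ≤ s[j])
    (lo hi : Nat) (hlh : lo ≤ hi) (hhl : hi ≤ s.length)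
    (hlow : ∀ i (h : i < s.length), i < lo → s[i] ≤ q)
    (hhigh : ∀ i (h : i < s.length), hi ≤ i → ¬ s[i] ≤ q) :
    pvBisect s q lo hi ≤ hi ∧
      (∀ i (h : i < s.length), (s[i] ≤ q ↔ i < pvBisect s q lo hi)) :=
  pvBisectFuel_spec s q hmono (hi - lo) lo hi (le_refl _) hlh hhl hlow hhigh

-- countP from an index boundary
theorem countP_of_boundary (p : Int → Bool) :
    ∀ (s : List Int) (c : Nat), c ≤ s.length →
      (∀ i (h : i < s.length), (p s[i] = true ↔ i < c)) → s.countP p = c := by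
  intro s
  induction s with
  | nil =>
    intro c hc _
    have : c = 0 := by simpa using hc
    simp [this]
  | cons a t ih =>
    intro c hc hb
    cases c with
    | zero =>
      have h0 := hb 0 (by simp)
      simp only [List.getElem_cons_zero] at h0
      have hpa : p a = false := by
        cases hpap : p a
        · rfl
        · exact absurd (h0.mp hpap) (by omega)
      have hct : t.countP p = 0 := by
        refine ih 0 (by omega) ?_
        intro i h
        have hi1 := hb (i + 1) (by simpa using h)
        simp only [List.getElem_cons_succ] at hi1
        constructor
        · intro hp; exact absurd (hi1.mp hp) (by omega)
        · omega
      simp [hpa, hct]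
    | succ c' =>
      have h0 := hb 0 (by simp)
      simp only [List.getElem_cons_zero] at h0
      have hpa : p a = true := h0.mpr (by omega)
      have hct : t.countP p = c' := by
        refine ih c' (by simpa using hc) ?_
        intro i h
        have hi1 := hb (i + 1) (by simpa using h)
        simp only [List.getElem_cons_succ] at hi1
        constructor
        · intro hp; have := hi1.mp hp; omega
        · intro hlt; exact hi1.mpr (by omega)
      simp [hpa, hct]

-- the two complementary counts fill the whole list
theorem countP_le_add_countP_gt (q : Int) (s : List Int) :
    s.countP (fun x => decide (q < x)) + s.countP (fun x => decide (x ≤ q)) = s.length := by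
  induction s with
  | nil => simp
  | cons a t ih =>
    by_cases h : q < a
    · simp [h, not_le.mpr h]; omega
    · simp [h, not_lt.mp h]; omega

-- main loop invariant: A's seen-set and B's sorted list hold the same distinct elements
theorem fold_agree :
    ∀ (l : List Int) (sa : PySem.Set Int) (sb : List Int) (out : List Int),
      sa.Nodup → sb.Pairwise (fun a b => a < b) → (∀ x, x ∈ sb ↔ x ∈ sa) →
      (l.foldl pvStepA (sa, out)).2 = (l.foldl pvStepB (sb, out)).2 := by
  intro l
  induction l with
  | nil => intro sa sb out _ _ _; rfl
  | cons q t ih =>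
    intro sa sb out hnd hsort hmem
    have hnb : sb.Nodup := hsort.imp ne_of_lt
    have hmono : ∀ i j (hi : i < sb.length) (hj : j < sb.length), i ≤ j → sb[i] ≤ sb[j] := by
      intro i j hi hj hij
      rcases Nat.lt_or_ge i j with h | h
      · exact le_of_lt (List.pairwise_iff_getElem.mp hsort i j hi hj h)
      · have hij' : i = j := by omega
        subst hij'; exact le_refl _
    have hspec := pvBisect_spec sb q hmono 0 sb.length (by omega) (le_refl _)
      (fun i h hlt => absurd hlt (Nat.not_lt_zero i))
      (fun i h hge => absurd h (by omega))
    set c := pvBisect sb q 0 sb.length with hcdef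
    have hcle : c ≤ sb.length := hspec.1
    have hbnd : ∀ i (h : i < sb.length), (sb[i] ≤ q ↔ i < c) := hspec.2
    have hcount : sb.countP (fun x => decide (x ≤ q)) = c := by
      refine countP_of_boundary _ sb c hcle ?_
      intro i h
      simpa using hbnd i h
    have hperm : sb.Perm sa := (List.perm_ext_iff_of_nodup hnb hnd).mpr hmem
    have hval : (((PySem.List.index? (PySem.List.sorted (sa ++ [q]) (fun x => x) true) q).getD 0 : Nat) : Int) + 1
        = ((sb.length : Int) - (c : Int)) + 1 := by
      rw [valueA]
      have h1 := countP_le_add_countP_gt q sb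
      have h2 := hperm.countP_eq (fun x => decide (q < x))
      omega
    simp only [List.foldl_cons, pvStepA, pvStepB]
    rw [hval]
    by_cases hqb : q ∈ sb
    · have hc0 : c ≠ 0 ∧ sb.getD (c - 1) 0 = q := by
        obtain ⟨i, hi, hiq⟩ := List.mem_iff_getElem.mp hqb
        have hic : i < c := (hbnd i hi).mp (le_of_eq hiq)
        have hc1 : c - 1 < sb.length := by omega
        refine ⟨by omega, ?_⟩
        rw [List.getD_eq_getElem sb 0 hc1]
        refine le_antisymm ((hbnd (c - 1) hc1).mpr (by omega)) ?_
        calc q = sb[i] := hiq.symm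
          _ ≤ sb[c - 1] := hmono i (c - 1) hi hc1 (by omega)
      rw [if_neg (by rw [not_or, not_ne_iff]; exact ⟨hc0.1, hc0.2⟩)]
      refine ih (PySem.Set.add sa q) sb _ (PySem.Set.nodup_add sa q hnd) hsort ?_
      intro x
      rw [PySem.Set.mem_add]
      constructor
      · intro hx; exact Or.inl ((hmem x).mp hx)
      · rintro (hx | rfl)
        · exact (hmem x).mpr hx
        · exact hqb
    · have hcond : c = 0 ∨ sb.getD (c - 1) 0 ≠ q := by
        by_cases hc0 : c = 0
        · exact Or.inl hc0
        · right
          have hc1 : c - 1 < sb.length := by omega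
          rw [List.getD_eq_getElem sb 0 hc1]
          intro hEq
          exact hqb (hEq ▸ List.getElem_mem hc1)
      rw [if_pos hcond, PySem.List.insert_natCast sb c q hcle]
      have htake : ∀ x ∈ sb.take c, x < q := by
        intro x hx
        obtain ⟨i, hi, hix⟩ := List.mem_iff_getElem.mp hx
        have hlen : i < c := by
          have h' := hi
          simp [List.length_take] at h'
          omega
        have hisb : i < sb.length := by omega
        have hxq : x ≤ q := by
          rw [← hix]
          have hgt : (sb.take c)[i] = sb[i] := List.getElem_take
          rw [hgt]
          exact (hbnd i hisb).mpr hlen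
        have hxs : x ∈ sb := List.mem_of_mem_take hx
        exact lt_of_le_of_ne hxq (fun h => hqb (h ▸ hxs))
      have hdrop : ∀ y ∈ sb.drop c, q < y := by
        intro y hy
        obtain ⟨i, hi, hiy⟩ := List.mem_iff_getElem.mp hy
        have hlen2 : c + i < sb.length := by
          have h' := hi
          simp [List.length_drop] at h'
          omega
        have hyg : y = sb[c + i] := by
          rw [← hiy]
          exact List.getElem_drop
        have hny : ¬ sb[c + i] ≤ q := fun hle => by
          have := (hbnd (c + i) hlen2).mp hle
          omega
        rw [hyg]
        exact not_le.mp hny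
      have hsplit := List.take_append_drop c sb
      have hsort' : (sb.take c ++ q :: sb.drop c).Pairwise (fun a b => a < b) := by
        have hPs : (sb.take c ++ sb.drop c).Pairwise (fun a b => a < b) := by
          rw [hsplit]; exact hsort
        rcases List.pairwise_append.mp hPs with ⟨p1, p2, _⟩
        refine List.pairwise_append.mpr ⟨p1, ?_, ?_⟩
        · exact List.pairwise_cons.mpr ⟨fun y hy => hdrop y hy, p2⟩
        · intro x hx y hy
          rcases List.mem_cons.mp hy with rfl | hy'
          · exact htake x hx
          · exact lt_trans (htake x hx) (hdrop y hy')
      refine ih (PySem.Set.add sa q) _ _ (PySem.Set.nodup_add sa q hnd) hsort' ?_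
      intro x
      rw [PySem.Set.mem_add]
      constructor
      · intro hx
        rcases List.mem_append.mp hx with h1 | h2
        · exact Or.inl ((hmem x).mp (List.mem_of_mem_take h1))
        · rcases List.mem_cons.mp h2 with rfl | h3
          · exact Or.inr rfl
          · exact Or.inl ((hmem x).mp (List.mem_of_mem_drop h3))
      · rintro (hx | rfl)
        · have hxs : x ∈ sb := (hmem x).mpr hx
          have hxtd : x ∈ sb.take c ++ sb.drop c := by rw [hsplit]; exact hxs
          rcases List.mem_append.mp hxtd with h1 | h2
          · exact List.mem_append.mpr (Or.inl h1)
          · exact List.mem_append.mpr (Or.inr (List.mem_cons_of_mem _ h2))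
        · exact List.mem_append.mpr (Or.inr (List.mem_cons_self))

-- ===== VERDICT (by name: the statement is the Claim_ definition above) =====
theorem climb_ladder_spec : Claim_equal_climb_ladder := by
  intro arr arr_two _
  unfold Spec_climb_ladder climb_ladder climb_ladder_alt
  refine fold_agree arr_two (PySem.Set.ofList arr) _ [] (PySem.Set.nodup_ofList arr) ?_ ?_
  · exact PySem.List.sorted_ofList_pairwise_lt arr
  · intro x
    rw [PySem.List.mem_sorted]
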